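-- pv_equiv track=rewrite | github.com/LLLin000/coc-keeper-runtime | src/dm_bot/rules/coc/derived.py | get_age_modifiers
-- ===== SOURCE A (Python) =====
-- AGE_MODIFIERS = {
--     # Age: (STR, CON, DEX, APP, POW, INT, EDU)
--     (20, 29): (0, 0, 0, 0, 0, 0, 0),
--     (30, 39): (0, 0, 0, 0, 0, +1, +1),
--     (40, 49): (-5, -10, -10, -10, 0, +2, +3),
--     (50, 59): (-10, -15, -15, -15, 0, +3, +6),
--     (60, 69): (-15, -20, -20, -20, 0, +4, +8),
--     (70, 79): (-20, -25, -25, -25, 0, +5, +10),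
--     (80, 89): (-25, -30, -30, -30, 0, +6, +12),
--     (90, 99): (-30, -35, -35, -35, 0, +7, +14),
-- }
--
-- def get_age_modifiers(age: int) -> dict[str, int]:
--     """Get attribute modifiers due to age.
--
--     Args:
--         age: Character's age
--
--     Returns:
--         Dictionary of attribute modifiers
--     """
--     for (min_age, max_age), mods in AGE_MODIFIERS.items():
--         if min_age <= age <= max_age:
--             return {
--                 "str": mods[0],
--                 "con": mods[1],
--                 "dex": mods[2],
--                 "app": mods[3],
--                 "pow": mods[4],
--                 "int": mods[5],
--                 "edu": mods[6],
--             }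
--     return {
--         "str": 0,
--         "con": 0,
--         "dex": 0,
--         "app": 0,
--         "pow": 0,
--         "int": 0,
--         "edu": 0,
--     }
-- ===== SOURCE B (Python) =====
-- # Computed-index lookup: decade index instead of scanning brackets.
--
-- _MOD_ROWS = [
--     (0, 0, 0, 0, 0, 0, 0),
--     (0, 0, 0, 0, 0, 1, 1),
--     (-5, -10, -10, -10, 0, 2, 3),
--     (-10, -15, -15, -15, 0, 3, 6),
--     (-15, -20, -20, -20, 0, 4, 8),
--     (-20, -25, -25, -25, 0, 5, 10),
--     (-25, -30, -30, -30, 0, 6, 12),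
--     (-30, -35, -35, -35, 0, 7, 14),
-- ]
-- _KEYS = ("str", "con", "dex", "app", "pow", "int", "edu")
--
-- def get_age_modifiers(age: int) -> dict[str, int]:
--     i = age // 10 - 2
--     row = _MOD_ROWS[i] if 0 <= i <= 7 else (0,) * 7
--     return dict(zip(_KEYS, row))
-- ===== Notes on version B (the rewrite author's own statement) =====
-- stated objective: simpler
-- what changed: Replaces the linear scan over eight (min,max) brackets with a directly computed decade index into an ordered row list, building the result dict by zipping the key names with that row.
import Mathlib
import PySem

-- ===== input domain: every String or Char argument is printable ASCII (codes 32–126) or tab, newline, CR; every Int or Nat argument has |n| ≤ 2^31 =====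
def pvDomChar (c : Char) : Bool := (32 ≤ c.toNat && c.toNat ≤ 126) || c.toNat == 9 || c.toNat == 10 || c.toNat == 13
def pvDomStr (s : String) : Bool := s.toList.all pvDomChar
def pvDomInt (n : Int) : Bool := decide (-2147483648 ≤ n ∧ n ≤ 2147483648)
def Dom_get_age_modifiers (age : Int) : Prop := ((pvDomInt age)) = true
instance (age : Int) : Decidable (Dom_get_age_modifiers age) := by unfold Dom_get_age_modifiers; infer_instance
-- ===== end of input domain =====

-- B replaces A's linear bracket scan with a computed decade index into an ordered row list (simpler).

-- ===== PORT A =====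
-- AGE_MODIFIERS dict, in insertion order: ((min,max), (STR,CON,DEX,APP,POW,INT,EDU))
def ageModifiersA : List ((Int × Int) × (Int × Int × Int × Int × Int × Int × Int)) :=
  [ ((20, 29), (0, 0, 0, 0, 0, 0, 0)),
    ((30, 39), (0, 0, 0, 0, 0, 1, 1)),
    ((40, 49), (-5, -10, -10, -10, 0, 2, 3)),
    ((50, 59), (-10, -15, -15, -15, 0, 3, 6)),
    ((60, 69), (-15, -20, -20, -20, 0, 4, 8)),
    ((70, 79), (-20, -25, -25, -25, 0, 5, 10)),
    ((80, 89), (-25, -30, -30, -30, 0, 6, 12)),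
    ((90, 99), (-30, -35, -35, -35, 0, 7, 14)) ]

def mkModDictA (m : Int × Int × Int × Int × Int × Int × Int) : List (String × Int) :=
  [("str", m.1), ("con", m.2.1), ("dex", m.2.2.1), ("app", m.2.2.2.1),
   ("pow", m.2.2.2.2.1), ("int", m.2.2.2.2.2.1), ("edu", m.2.2.2.2.2.2)]

-- the for-loop over AGE_MODIFIERS.items() with its early return
def ageLoopA (age : Int) : List ((Int × Int) × (Int × Int × Int × Int × Int × Int × Int)) → List (String × Int)
  | [] => [("str", 0), ("con", 0), ("dex", 0), ("app", 0), ("pow", 0), ("int", 0), ("edu", 0)]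
  | ((lo, hi), m) :: rest => if lo ≤ age ∧ age ≤ hi then mkModDictA m else ageLoopA age rest

def get_age_modifiers (age : Int) : List (String × Int) := ageLoopA age ageModifiersA

-- ===== PORT B =====
def modRowsB : List (List Int) :=
  [ [0, 0, 0, 0, 0, 0, 0],
    [0, 0, 0, 0, 0, 1, 1],
    [-5, -10, -10, -10, 0, 2, 3],
    [-10, -15, -15, -15, 0, 3, 6],
    [-15, -20, -20, -20, 0, 4, 8],
    [-20, -25, -25, -25, 0, 5, 10],
    [-25, -30, -30, -30, 0, 6, 12],
    [-30, -35, -35, -35, 0, 7, 14] ]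

def keysB : List String := ["str", "con", "dex", "app", "pow", "int", "edu"]

def get_age_modifiers_alt (age : Int) : List (String × Int) :=
  let i : Int := PySem.Int.floordiv age 10 - 2
  let row : List Int :=
    if 0 ≤ i ∧ i ≤ 7 then (PySem.List.pyGet? modRowsB i).getD [] else [0, 0, 0, 0, 0, 0, 0]
  List.zip keysB row

-- ===== PRECONDITION & SPEC =====
def Spec_get_age_modifiers (age : Int) (out : List (String × Int)) : Prop := out = get_age_modifiers_alt age
instance (age : Int) (out : List (String × Int)) : Decidable (Spec_get_age_modifiers age out) := by unfold Spec_get_age_modifiers; infer_instance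

-- ===== CLAIM (what is proved, stated in full; the proofs are below) =====
def Claim_equal_get_age_modifiers : Prop := ∀ (age : Int), Dom_get_age_modifiers age → Spec_get_age_modifiers age (get_age_modifiers age)

-- ===== LEMMAS AND PROOFS =====

theorem fdiv10_eq (age q : Int) (h1 : q * 10 ≤ age) (h2 : age < (q + 1) * 10) :
    PySem.Int.floordiv age 10 = q :=
  (PySem.Int.floordiv_eq_iff_of_pos (by norm_num)).mpr ⟨h1, h2⟩

-- ===== VERDICT (by name: the statement is the Claim_ definition above) =====
theorem get_age_modifiers_spec : Claim_equal_get_age_modifiers := by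
  intro age _
  unfold Spec_get_age_modifiers get_age_modifiers get_age_modifiers_alt
  have hq := (PySem.Int.floordiv_eq_iff_of_pos (b := (10:Int)) (a := age)
    (q := PySem.Int.floordiv age 10) (by norm_num)).mp rfl
  set q : Int := PySem.Int.floordiv age 10 with hqdef
  by_cases hlo : age < 20
  · have hle : q ≤ 1 := by nlinarith [hq.1, hq.2]
    simp only [ageModifiersA, ageLoopA, mkModDictA]
    rw [if_neg (by omega), if_neg (by omega), if_neg (by omega), if_neg (by omega),
        if_neg (by omega), if_neg (by omega), if_neg (by omega), if_neg (by omega),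
        if_neg (by omega)]
    rfl
  · by_cases hhi : 99 < age
    · have hge : 10 ≤ q := by nlinarith [hq.1, hq.2]
      simp only [ageModifiersA, ageLoopA, mkModDictA]
      rw [if_neg (by omega), if_neg (by omega), if_neg (by omega), if_neg (by omega),
          if_neg (by omega), if_neg (by omega), if_neg (by omega), if_neg (by omega),
          if_neg (by omega)]
      rfl
    · -- 20 <= age <= 99: eight decades
      by_cases d2 : age ≤ 29
      · have hqe : q = 2 := by rw [hqdef]; exact fdiv10_eq age 2 (by omega) (by omega)
        rw [hqe]
        simp only [ageModifiersA, ageLoopA, mkModDictA]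
        rw [if_pos (by omega)]
        try decide
      by_cases d3 : age ≤ 39
      · have hqe : q = 3 := by rw [hqdef]; exact fdiv10_eq age 3 (by omega) (by omega)
        rw [hqe]
        simp only [ageModifiersA, ageLoopA, mkModDictA]
        rw [if_neg (by omega), if_pos (by omega)]
        try decide
      by_cases d4 : age ≤ 49
      · have hqe : q = 4 := by rw [hqdef]; exact fdiv10_eq age 4 (by omega) (by omega)
        rw [hqe]
        simp only [ageModifiersA, ageLoopA, mkModDictA]
        rw [if_neg (by omega), if_neg (by omega), if_pos (by omega)]
        try decide
      by_cases d5 : age ≤ 59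
      · have hqe : q = 5 := by rw [hqdef]; exact fdiv10_eq age 5 (by omega) (by omega)
        rw [hqe]
        simp only [ageModifiersA, ageLoopA, mkModDictA]
        rw [if_neg (by omega), if_neg (by omega), if_neg (by omega), if_pos (by omega)]
        try decide
      by_cases d6 : age ≤ 69
      · have hqe : q = 6 := by rw [hqdef]; exact fdiv10_eq age 6 (by omega) (by omega)
        rw [hqe]
        simp only [ageModifiersA, ageLoopA, mkModDictA]
        rw [if_neg (by omega), if_neg (by omega), if_neg (by omega), if_neg (by omega), if_pos (by omega)]
        try decide
      by_cases d7 : age ≤ 79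
      · have hqe : q = 7 := by rw [hqdef]; exact fdiv10_eq age 7 (by omega) (by omega)
        rw [hqe]
        simp only [ageModifiersA, ageLoopA, mkModDictA]
        rw [if_neg (by omega), if_neg (by omega), if_neg (by omega), if_neg (by omega), if_neg (by omega), if_pos (by omega)]
        try decide
      by_cases d8 : age ≤ 89
      · have hqe : q = 8 := by rw [hqdef]; exact fdiv10_eq age 8 (by omega) (by omega)
        rw [hqe]
        simp only [ageModifiersA, ageLoopA, mkModDictA]
        rw [if_neg (by omega), if_neg (by omega), if_neg (by omega), if_neg (by omega), if_neg (by omega), if_neg (by omega), if_pos (by omega)]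
        try decide
      have hqe : q = 9 := by rw [hqdef]; exact fdiv10_eq age 9 (by omega) (by omega)
      rw [hqe]
      simp only [ageModifiersA, ageLoopA, mkModDictA]
      rw [if_neg (by omega), if_neg (by omega), if_neg (by omega), if_neg (by omega), if_neg (by omega), if_neg (by omega), if_neg (by omega), if_pos (by omega)]
      try decide
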